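-- pv_equiv track=rewrite | github.com/FeChiste/Crud | pythonn/Exercicios repetição.py | verificar_numero_perfeito_euler
-- ===== SOURCE A (Python) =====
-- def verificar_numero_perfeito_euler(num):
--     if num < 2:
--         return False
--     exp = 0
--     mersenne = 2 ** exp - 1
--     euler = (2 ** (exp - 1)) * mersenne
--     while euler < num:
--         exp += 1
--         mersenne = 2 ** exp - 1
--         euler = (2 ** (exp - 1)) * mersenne
--     if euler == num:
--         return True
--     return False
-- ===== SOURCE B (Python) =====
-- def verificar_numero_perfeito_euler(num):
--     if num < 2:
--         return False
--     k = 0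
--     m = num
--     while m % 2 == 0:
--         m //= 2
--         k += 1
--     return m == 2 ** (k + 1) - 1
-- ===== Notes on version B (the rewrite author's own statement) =====
-- stated objective: alternative
-- what changed: B factors num into its odd part and power of two with a halving loop and checks whether the odd part is the Mersenne cofactor for that power, instead of enumerating Euler candidates upward until they reach num.
import Mathlib
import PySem

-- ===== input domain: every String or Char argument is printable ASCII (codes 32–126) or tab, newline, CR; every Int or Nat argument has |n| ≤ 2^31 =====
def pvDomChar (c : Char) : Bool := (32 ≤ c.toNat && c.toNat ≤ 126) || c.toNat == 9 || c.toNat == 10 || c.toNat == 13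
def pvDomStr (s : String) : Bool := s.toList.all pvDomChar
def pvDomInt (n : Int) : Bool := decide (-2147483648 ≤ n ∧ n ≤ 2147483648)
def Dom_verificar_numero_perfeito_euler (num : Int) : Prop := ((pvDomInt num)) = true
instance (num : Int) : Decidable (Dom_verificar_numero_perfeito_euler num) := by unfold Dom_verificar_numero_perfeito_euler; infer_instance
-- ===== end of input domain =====

-- B factors num into odd part × power of two and tests m = 2^(k+1)-1 directly,
-- instead of A's enumeration of Euler candidates 2^(e-1)(2^e-1) upward to num (objective: alternative decomposition).

-- ===== PORT A =====
-- euler value after A has set `exp`: mersenne = 2^exp - 1, euler = 2^(exp-1) * mersenne.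
-- At exp = 0 Python computes 2**(-1)*0 = 0.0; Nat subtraction gives 2^0*0 = 0, the same value
-- (the float never survives: for num ≥ 2 the loop always runs at least once).
def eulerOf (exp : Nat) : Int := 2 ^ (exp - 1) * (2 ^ exp - 1)

theorem eulerOf_lt_succ (e : Nat) : eulerOf e < eulerOf (e + 1) := by
  cases e with
  | zero => decide
  | succ s =>
      simp only [eulerOf, Nat.succ_sub_one]
      have h : (0:Int) < 2 ^ s := by positivity
      have h1 : (2:Int) ^ (s + 1) = 2 * 2 ^ s := by ring
      have h2 : (2:Int) ^ (s + 2) = 4 * 2 ^ s := by ring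
      nlinarith [h, h1, h2]

-- the while loop of A: keep advancing exp while euler < num; returns the final euler
def aLoop (num : Int) (exp : Nat) : Int :=
  if eulerOf exp < num then aLoop num (exp + 1) else eulerOf exp
termination_by (num - eulerOf exp).toNat
decreasing_by
  have := eulerOf_lt_succ exp
  omega

def verificar_numero_perfeito_euler (num : Int) : Bool :=
  if num < 2 then false
  else if aLoop num 0 = num then true else false

-- ===== PORT B =====
-- the while loop of B: strip factors of 2 from m, counting them in k.
-- (the 0 < m conjunct only makes the recursion total; B is only called with m = num ≥ 2)
def bLoop (m : Int) (k : Nat) : Int × Nat :=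
  if h : 0 < m ∧ PySem.Int.mod m 2 = 0 then
    bLoop (PySem.Int.floordiv m 2) (k + 1)
  else (m, k)
termination_by m.toNat
decreasing_by
  rcases h with ⟨hm, he⟩
  rw [PySem.Int.floordiv_eq_ediv_of_pos (by omega)]
  rw [PySem.Int.mod_eq_emod_of_pos (by omega)] at he
  omega

def verificar_numero_perfeito_euler_alt (num : Int) : Bool :=
  if num < 2 then false
  else
    let p := bLoop num 0
    decide (p.1 = 2 ^ (p.2 + 1) - 1)

-- ===== PRECONDITION & SPEC =====
def Spec_verificar_numero_perfeito_euler (num : Int) (out : Bool) : Prop := out = verificar_numero_perfeito_euler_alt num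
instance (num : Int) (out : Bool) : Decidable (Spec_verificar_numero_perfeito_euler num out) := by unfold Spec_verificar_numero_perfeito_euler; infer_instance

-- ===== CLAIM (what is proved, stated in full; the proofs are below) =====
def Claim_equal_verificar_numero_perfeito_euler : Prop := ∀ (num : Int), Dom_verificar_numero_perfeito_euler num → Spec_verificar_numero_perfeito_euler num (verificar_numero_perfeito_euler num)

-- ===== LEMMAS AND PROOFS =====

theorem eulerOf_mono {e j : Nat} (h : e ≤ j) : eulerOf e ≤ eulerOf j := by
  induction j with
  | zero => simp_all
  | succ t ih =>
      rcases Nat.lt_or_ge e (t + 1) with hlt | hge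
      · exact le_trans (ih (by omega)) (le_of_lt (eulerOf_lt_succ t))
      · have : e = t + 1 := by omega
        simp [this]

theorem aLoop_eq_iff (num : Int) (e : Nat) :
    aLoop num e = num ↔ ∃ j, e ≤ j ∧ eulerOf j = num := by
  induction e using aLoop.induct (num := num) with
  | case1 e hlt ih =>
      rw [aLoop, if_pos hlt, ih]
      constructor
      · rintro ⟨j, hj, rfl⟩; exact ⟨j, by omega, rfl⟩
      · rintro ⟨j, hj, rfl⟩
        refine ⟨j, ?_, rfl⟩
        rcases Nat.lt_or_ge e j with h | h
        · omega
        · have : j = e := by omega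
          subst this; omega
  | case2 e hlt =>
      rw [aLoop, if_neg hlt]
      constructor
      · intro h; exact ⟨e, le_refl _, h⟩
      · rintro ⟨j, hj, rfl⟩
        have := eulerOf_mono hj
        omega

theorem bLoop_spec (m : Int) (k : Nat) (hm : 0 < m) :
    PySem.Int.mod (bLoop m k).1 2 = 1 ∧ 0 < (bLoop m k).1 ∧ k ≤ (bLoop m k).2 ∧
      m * 2 ^ k = (bLoop m k).1 * 2 ^ (bLoop m k).2 := by
  induction m, k using bLoop.induct with
  | case1 m k h ih =>
      rcases h with ⟨hpos, he⟩
      rw [PySem.Int.mod_eq_emod_of_pos (by omega)] at he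
      have hdiv : PySem.Int.floordiv m 2 = m / 2 := PySem.Int.floordiv_eq_ediv_of_pos (by omega)
      have hpos' : 0 < PySem.Int.floordiv m 2 := by rw [hdiv]; omega
      obtain ⟨h1, h2, h3, h4⟩ := ih hpos'
      rw [bLoop, dif_pos ⟨hpos, by rw [PySem.Int.mod_eq_emod_of_pos (by omega)]; exact he⟩]
      refine ⟨h1, h2, by omega, ?_⟩
      have hm2 : m = 2 * (m / 2) := by omega
      calc m * 2 ^ k = (2 * (m / 2)) * 2 ^ k := by rw [← hm2]
        _ = (m / 2) * 2 ^ (k + 1) := by ring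
        _ = PySem.Int.floordiv m 2 * 2 ^ (k + 1) := by rw [hdiv]
        _ = _ := h4
  | case2 m k h =>
      rw [bLoop, dif_neg h]
      have he : ¬ PySem.Int.mod m 2 = 0 := fun hc => h ⟨hm, hc⟩
      rw [PySem.Int.mod_eq_emod_of_pos (by omega)] at he ⊢
      refine ⟨by omega, hm, le_refl _, rfl⟩

-- uniqueness of the odd-part decomposition over Int
theorem odd_pow2_unique (i : Nat) : ∀ (j : Nat) (a b : Int), 0 < a → 0 < b →
    a % 2 = 1 → b % 2 = 1 → a * 2 ^ i = b * 2 ^ j → a = b ∧ i = j := by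
  induction i with
  | zero =>
      intro j a b ha hb hoa hob heq
      cases j with
      | zero => simp_all
      | succ t =>
          exfalso
          have : a = b * 2 ^ t * 2 := by rw [pow_succ] at heq; simpa [mul_assoc] using heq
          omega
  | succ s ih =>
      intro j a b ha hb hoa hob heq
      cases j with
      | zero =>
          exfalso
          have : b = a * 2 ^ s * 2 := by rw [pow_succ] at heq; simpa [mul_assoc] using heq.symm
          omega
      | succ t =>
          have heq' : a * 2 ^ s = b * 2 ^ t := by
            have h2 : a * 2 ^ s * 2 = b * 2 ^ t * 2 := by
              rw [pow_succ, pow_succ] at heq; simpa [mul_assoc] using heq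
            omega
          obtain ⟨h1, h2⟩ := ih t a b ha hb hoa hob heq'
          exact ⟨h1, by omega⟩

theorem pow2_sub_one_odd (t : Nat) : ((2:Int) ^ (t + 1) - 1) % 2 = 1 := by
  have : (2:Int) ^ (t + 1) = 2 * 2 ^ t := by ring
  omega

theorem pow2_sub_one_pos (t : Nat) : (0:Int) < 2 ^ (t + 1) - 1 := by
  have : (1:Int) ≤ 2 ^ t := one_le_pow₀ (by norm_num)
  have : (2:Int) ^ (t + 1) = 2 * 2 ^ t := by ring
  omega

-- ===== VERDICT (by name: the statement is the Claim_ definition above) =====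
theorem verificar_numero_perfeito_euler_spec : Claim_equal_verificar_numero_perfeito_euler := by
  intro num _
  unfold Spec_verificar_numero_perfeito_euler verificar_numero_perfeito_euler verificar_numero_perfeito_euler_alt
  by_cases h2 : num < 2
  · simp [h2]
  · simp only [h2, if_false]
    have hpos : 0 < num := by omega
    obtain ⟨hodd, hbpos, -, hprod⟩ := bLoop_spec num 0 hpos
    rw [PySem.Int.mod_eq_emod_of_pos (by omega)] at hodd
    simp only [pow_zero, mul_one] at hprod
    set m := (bLoop num 0).1 with hm
    set k := (bLoop num 0).2 with hk
    have key : aLoop num 0 = num ↔ m = 2 ^ (k + 1) - 1 := by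
      rw [aLoop_eq_iff]
      constructor
      · rintro ⟨j, -, hj⟩
        cases j with
        | zero =>
            exfalso; rw [eulerOf] at hj; simp at hj; omega
        | succ t =>
            rw [eulerOf, Nat.succ_sub_one] at hj
            have heq : m * 2 ^ k = (2 ^ (t + 1) - 1) * 2 ^ t := by
              rw [← hj] at hprod; rw [← hprod]; ring
            obtain ⟨he, hke⟩ := odd_pow2_unique k t m (2 ^ (t + 1) - 1) hbpos
              (pow2_sub_one_pos t) hodd (pow2_sub_one_odd t) heq
            rw [he, hke]
      · intro hmv
        refine ⟨k + 1, by omega, ?_⟩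
        rw [eulerOf, Nat.succ_sub_one, ← hmv, hprod]
        ring
    by_cases ha : aLoop num 0 = num
    · simp [ha, key.mp ha]
    · have : ¬ m = 2 ^ (k + 1) - 1 := fun hc => ha (key.mpr hc)
      simp [ha, this]
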